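-- pv_equiv track=rewrite | github.com/bpupadhyaya/programming-interviews | top/topgoogbyfrequency/python/group2/find_all_possible_recipes_from_given_supplies_G23.py | find_all_recipes0
-- ===== SOURCE A (Python) =====
-- from collections import defaultdict, Counter, deque
--
-- def find_all_recipes0(recipes: list[str], ingredients: list[list[str]], supplies: list[str]) -> list[str]:
--     # Brute force, just to help understand the problem
--     ans = []
--     seen = set(supplies)
--     dq = deque([(r, ing) for r, ing in zip(recipes, ingredients)])
--
--     # dummy value for prev_size, just to make sure
--     # the initial value of prev_size < len(seen)
--     prev_size = len(seen) - 1
--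
--     # Keep searching if we have any new finding(s).
--     while len(seen) > prev_size:
--         prev_size = len(seen)
--         for _ in range(len(dq)):
--             r, ing = dq.popleft()
--             if all(i in seen for i in ing):
--                 ans.append(r)
--                 seen.add(r)
--             else:
--                 dq.append((r, ing))
--     return ans
-- ===== SOURCE B (Python) =====
-- def find_all_recipes0(recipes: list[str], ingredients: list[list[str]], supplies: list[str]) -> list[str]:
--     # Incremental missing-set relaxation: each recipe keeps the set of its
--     # ingredients not yet seen, shrunk only by names newly seen since its last
--     # check (timeline `newly`); a recipe is emitted when its set empties.
--     seen = set(supplies)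
--     newly = []          # names newly added to seen, in chronological order
--     pending = [(r, {x for x in ing if x not in seen}, 0)
--                for r, ing in zip(recipes, ingredients)]
--     ans = []
--     while pending:
--         progress = False
--         nxt = []
--         for r, miss, k in pending:
--             miss = miss - set(newly[k:])
--             if miss:
--                 nxt.append((r, miss, len(newly)))
--             else:
--                 ans.append(r)
--                 progress = True
--                 if r not in seen:
--                     seen.add(r)
--                     newly.append(r)
--         if not progress:
--             break
--         pending = nxt
--     return ans
-- ===== Notes on version B (the rewrite author's own statement) =====
-- stated objective: alternative
-- what changed: B replaces A's deque-rotation rescan (rechecking every ingredient of every remaining recipe against the seen-set each round) with per-recipe missing-ingredient sets that are shrunk incrementally by only the names newly seen since that recipe's last check (a timeline list with per-recipe cursors), emitting a recipe when its set empties, and stops on a round with no emission instead of tracking the seen-set's size.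
import Mathlib
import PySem

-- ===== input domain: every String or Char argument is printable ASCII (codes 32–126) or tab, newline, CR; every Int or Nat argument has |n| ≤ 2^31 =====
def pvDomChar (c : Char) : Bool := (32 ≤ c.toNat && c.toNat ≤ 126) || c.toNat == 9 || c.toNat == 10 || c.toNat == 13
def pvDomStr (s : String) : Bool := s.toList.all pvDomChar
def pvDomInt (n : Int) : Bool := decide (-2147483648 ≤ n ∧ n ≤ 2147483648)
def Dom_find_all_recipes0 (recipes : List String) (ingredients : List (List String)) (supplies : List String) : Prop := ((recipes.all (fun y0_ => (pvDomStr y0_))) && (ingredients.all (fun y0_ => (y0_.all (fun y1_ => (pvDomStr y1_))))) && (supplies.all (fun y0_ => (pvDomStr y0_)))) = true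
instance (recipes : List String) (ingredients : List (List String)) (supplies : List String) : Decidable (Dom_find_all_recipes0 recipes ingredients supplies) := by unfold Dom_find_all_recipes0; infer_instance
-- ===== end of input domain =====

-- B replaces A's deque-rotation full rescan by per-recipe missing-ingredient sets shrunk
-- incrementally by the names newly seen since each recipe's last check (objective: alternative).

-- ===== PORT A =====
-- one round of A's inner `for _ in range(len(dq))` loop: state (new deque, seen, ans)
def pvAPass (dq : List (String × List String)) (seen : PySem.Set String) (ans : List String) :
    List (String × List String) × PySem.Set String × List String :=
  dq.foldl (fun st it =>
    if it.2.all (fun i => PySem.Set.contains st.2.1 i) then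
      (st.1, PySem.Set.add st.2.1 it.1, st.2.2 ++ [it.1])
    else
      (st.1 ++ [it], st.2.1, st.2.2)) ([], seen, ans)

-- A's `while len(seen) > prev_size` loop; fuel bounds the executed iterations
-- (each iteration after the first needs |seen| to have grown, so dq.length + 2 always suffices)
def pvALoop : Nat → List (String × List String) → PySem.Set String → List String → Int → List String
  | 0, _, _, ans, _ => ans
  | fuel + 1, dq, seen, ans, prev =>
    if prev < PySem.Set.len seen then
      let st := pvAPass dq seen ans
      pvALoop fuel st.1 st.2.1 st.2.2 (PySem.Set.len seen)
    else ans

def find_all_recipes0 (recipes : List String) (ingredients : List (List String)) (supplies : List String) : List String :=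
  let seen := PySem.Set.ofList supplies
  let dq := recipes.zip ingredients
  pvALoop (dq.length + 2) dq seen [] (PySem.Set.len seen - 1)

-- ===== PORT B =====
-- one round of Source B's `for r, miss, k in pending` loop:
-- state (seen, newly, ans, progress, nxt); item (r, miss, k)
def pvBPass (pending : List (String × PySem.Set String × Int)) (seen : PySem.Set String)
    (newly : List String) (ans : List String) :
    PySem.Set String × List String × List String × Bool × List (String × PySem.Set String × Int) :=
  pending.foldl (fun st it =>
    let miss := PySem.Set.diff it.2.1 (PySem.Set.ofList (PySem.List.slice st.2.1 (some it.2.2) none))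
    if miss = [] then
      let ans' := st.2.2.1 ++ [it.1]
      if PySem.Set.contains st.1 it.1 then
        (st.1, st.2.1, ans', true, st.2.2.2.2)
      else
        (PySem.Set.add st.1 it.1, st.2.1 ++ [it.1], ans', true, st.2.2.2.2)
    else
      (st.1, st.2.1, st.2.2.1, st.2.2.2.1, st.2.2.2.2 ++ [(it.1, miss, (st.2.1.length : Int))]))
    (seen, newly, ans, false, [])

-- Source B's `while pending` loop with its `if not progress: break`
def pvBLoop : Nat → List (String × PySem.Set String × Int) → PySem.Set String → List String → List String → List String
  | 0, _, _, _, ans => ans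
  | fuel + 1, pending, seen, newly, ans =>
    match pending with
    | [] => ans
    | _ :: _ =>
      let st := pvBPass pending seen newly ans
      if st.2.2.2.1 then pvBLoop fuel st.2.2.2.2 st.1 st.2.1 st.2.2.1
      else st.2.2.1

def find_all_recipes0_alt (recipes : List String) (ingredients : List (List String)) (supplies : List String) : List String :=
  let seen := PySem.Set.ofList supplies
  let pending := (recipes.zip ingredients).map (fun p =>
    (p.1, PySem.Set.ofList (p.2.filter (fun x => !(PySem.Set.contains seen x))), (0 : Int)))
  pvBLoop ((recipes.zip ingredients).length + 2) pending seen [] []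

-- ===== PRECONDITION & SPEC =====
def Spec_find_all_recipes0 (recipes : List String) (ingredients : List (List String)) (supplies : List String) (out : List String) : Prop := out = find_all_recipes0_alt recipes ingredients supplies
instance (recipes : List String) (ingredients : List (List String)) (supplies : List String) (out : List String) : Decidable (Spec_find_all_recipes0 recipes ingredients supplies out) := by unfold Spec_find_all_recipes0; infer_instance

-- ===== CLAIM (what is proved, stated in full; the proofs are below) =====
def Claim_equal_find_all_recipes0 : Prop := ∀ (recipes : List String) (ingredients : List (List String)) (supplies : List String), Dom_find_all_recipes0 recipes ingredients supplies → Spec_find_all_recipes0 recipes ingredients supplies (find_all_recipes0 recipes ingredients supplies)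


-- ===== LEMMAS AND PROOFS =====

-- the step function of A's inner loop (definitionally the lambda inside pvAPass)
def pvStepA (st : List (String × List String) × PySem.Set String × List String)
    (it : String × List String) :
    List (String × List String) × PySem.Set String × List String :=
  if it.2.all (fun i => PySem.Set.contains st.2.1 i) then
    (st.1, PySem.Set.add st.2.1 it.1, st.2.2 ++ [it.1])
  else
    (st.1 ++ [it], st.2.1, st.2.2)

lemma pvAPass_eq (dq : List (String × List String)) (seen : PySem.Set String) (ans : List String) :
    pvAPass dq seen ans = dq.foldl pvStepA ([], seen, ans) := rfl

-- the step function of B's inner loop (definitionally the lambda inside pvBPass)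
def pvStepB (st : PySem.Set String × List String × List String × Bool × List (String × PySem.Set String × Int))
    (it : String × PySem.Set String × Int) :
    PySem.Set String × List String × List String × Bool × List (String × PySem.Set String × Int) :=
  let miss := PySem.Set.diff it.2.1 (PySem.Set.ofList (PySem.List.slice st.2.1 (some it.2.2) none))
  if miss = [] then
    let ans' := st.2.2.1 ++ [it.1]
    if PySem.Set.contains st.1 it.1 then
      (st.1, st.2.1, ans', true, st.2.2.2.2)
    else
      (PySem.Set.add st.1 it.1, st.2.1 ++ [it.1], ans', true, st.2.2.2.2)
  else
    (st.1, st.2.1, st.2.2.1, st.2.2.2.1, st.2.2.2.2 ++ [(it.1, miss, (st.2.1.length : Int))])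

lemma pvBPass_eq (p : List (String × PySem.Set String × Int)) (seen : PySem.Set String)
    (newly ans : List String) :
    pvBPass p seen newly ans = p.foldl pvStepB (seen, newly, ans, false, []) := rfl

-- coupling of one A-item with one B-item: same recipe name, and the stored miss-set
-- holds exactly the ingredients not seen at snapshot k of the `newly` timeline
def ItemRel (seen0 newly : List String) (a : String × List String)
    (b : String × PySem.Set String × Int) : Prop :=
  b.1 = a.1 ∧ ∃ k : Nat, b.2.2 = (k : Int) ∧ k ≤ newly.length ∧
    ∀ x : String, x ∈ b.2.1 ↔ (x ∈ a.2 ∧ x ∉ seen0 ++ newly.take k)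

lemma itemRel_mono (seen0 newly d : List String) (a : String × List String)
    (b : String × PySem.Set String × Int) (h : ItemRel seen0 newly a b) :
    ItemRel seen0 (newly ++ d) a b := by
  obtain ⟨h1, k, hk, hkle, hmem⟩ := h
  refine ⟨h1, k, hk, ?_, ?_⟩
  · simp only [List.length_append]; omega
  · intro x
    rw [List.take_append_of_le_length hkle]
    exact hmem x

lemma forall₂_append {α β : Type} {R : α → β → Prop} :
    ∀ {l₁ : List α} {l₂ : List β} {l₃ : List α} {l₄ : List β},
      List.Forall₂ R l₁ l₂ → List.Forall₂ R l₃ l₄ → List.Forall₂ R (l₁ ++ l₃) (l₂ ++ l₄) := by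
  intro l₁ l₂ l₃ l₄ h₁ h₂
  induction h₁ with
  | nil => simpa using h₂
  | cons hab _ ih => exact List.Forall₂.cons hab ih

-- the updated miss-set of a related item holds the ingredients not currently seen
lemma missMem (seen0 newly : List String) (a : String × List String)
    (b : String × PySem.Set String × Int) (h : ItemRel seen0 newly a b) (x : String) :
    x ∈ PySem.Set.diff b.2.1 (PySem.Set.ofList (PySem.List.slice newly (some b.2.2) none)) ↔
      (x ∈ a.2 ∧ x ∉ seen0 ++ newly) := by
  obtain ⟨_, k, hk, hkle, hmem⟩ := h
  rw [hk, PySem.List.slice_from_natCast]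
  rw [PySem.Set.mem_diff, PySem.Set.mem_ofList, hmem x]
  constructor
  · rintro ⟨⟨hx, hns⟩, hnd⟩
    refine ⟨hx, ?_⟩
    intro hmem2
    rcases List.mem_append.mp hmem2 with h0 | hn
    · exact hns (List.mem_append.mpr (Or.inl h0))
    · rcases List.mem_append.mp ((List.take_append_drop k newly) ▸ hn) with ht | hd
      · exact hns (List.mem_append.mpr (Or.inr ht))
      · exact hnd hd
  · rintro ⟨hx, hns⟩
    refine ⟨⟨hx, fun hc => ?_⟩, fun hc => ?_⟩
    · rcases List.mem_append.mp hc with h0 | ht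
      · exact hns (List.mem_append.mpr (Or.inl h0))
      · exact hns (List.mem_append.mpr (Or.inr (List.mem_of_mem_take ht)))
    · exact hns (List.mem_append.mpr (Or.inr (List.mem_of_mem_drop hc)))

lemma missEmpty_iff (seen0 newly : List String) (a : String × List String)
    (b : String × PySem.Set String × Int) (h : ItemRel seen0 newly a b) :
    (PySem.Set.diff b.2.1 (PySem.Set.ofList (PySem.List.slice newly (some b.2.2) none)) = []) ↔
      (a.2.all (fun i => PySem.Set.contains (seen0 ++ newly) i) = true) := by
  rw [List.eq_nil_iff_forall_not_mem, List.all_eq_true]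
  constructor
  · intro hall x hx
    rw [PySem.Set.contains_iff]
    by_contra hns
    exact hall x ((missMem seen0 newly a b h x).mpr ⟨hx, hns⟩)
  · intro hall x hc
    obtain ⟨hx, hns⟩ := (missMem seen0 newly a b h x).mp hc
    exact hns ((PySem.Set.contains_iff _ _).mp (hall x hx))

-- the coupled one-round lemma: running A's round (from accumulated requeue ndq) and
-- B's round (from accumulated requeue nxt, progress flag pr) over related item lists
-- yields related states, the same emissions, and the same timeline extension
lemma pvPassRel (seen0 : List String) :
    ∀ (dq : List (String × List String)) (pend : List (String × PySem.Set String × Int))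
      (newly ans : List String)
      (ndq : List (String × List String)) (nxt : List (String × PySem.Set String × Int)) (pr : Bool),
      List.Forall₂ (ItemRel seen0 newly) dq pend →
      List.Forall₂ (ItemRel seen0 newly) ndq nxt →
      (seen0 ++ newly).Nodup →
      ∃ (dq' : List (String × List String)) (nxt' : List (String × PySem.Set String × Int))
        (d em : List String),
        dq.foldl pvStepA (ndq, seen0 ++ newly, ans) = (dq', seen0 ++ (newly ++ d), ans ++ em) ∧
        pend.foldl pvStepB (seen0 ++ newly, newly, ans, pr, nxt) =
          (seen0 ++ (newly ++ d), newly ++ d, ans ++ em, pr || !em.isEmpty, nxt') ∧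
        (seen0 ++ (newly ++ d)).Nodup ∧
        List.Forall₂ (ItemRel seen0 (newly ++ d)) dq' nxt' ∧
        dq'.length + em.length = ndq.length + dq.length ∧
        (d ≠ [] → em ≠ []) ∧
        (d = [] →
          (∀ it ∈ ndq, it.2.all (fun i => PySem.Set.contains (seen0 ++ newly) i) = false) →
          ∀ it ∈ dq', it.2.all (fun i => PySem.Set.contains (seen0 ++ newly) i) = false) := by
  intro dq
  induction dq with
  | nil =>
    intro pend newly ans ndq nxt pr hrel hacc hnd
    rcases hrel with _ | _
    refine ⟨ndq, nxt, [], [], ?_, ?_, ?_, ?_, ?_, ?_, ?_⟩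
    · simp
    · simp
    · simpa using hnd
    · simpa using hacc
    · simp
    · simp
    · intro _ h it hit; exact h it hit
  | cons a dqt ih =>
    intro pend newly ans ndq nxt pr hrel hacc hnd
    rcases hrel with _ | ⟨hab, htail⟩
    rename_i b pendt
    by_cases hcond : a.2.all (fun i => PySem.Set.contains (seen0 ++ newly) i) = true
    · -- emitted
      have hmiss : PySem.Set.diff b.2.1
          (PySem.Set.ofList (PySem.List.slice newly (some b.2.2) none)) = [] :=
        (missEmpty_iff seen0 newly a b hab).mpr hcond
      have hb1 : b.1 = a.1 := hab.1
      by_cases hseen : a.1 ∈ seen0 ++ newly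
      · -- name already seen: timeline unchanged
        have hAstep : pvStepA (ndq, seen0 ++ newly, ans) a =
            (ndq, seen0 ++ newly, ans ++ [a.1]) := by
          simp only [pvStepA, hcond, if_true]
          rw [PySem.Set.add_of_mem hseen]
        have hBstep : pvStepB (seen0 ++ newly, newly, ans, pr, nxt) b =
            (seen0 ++ newly, newly, ans ++ [a.1], true, nxt) := by
          simp only [pvStepB, hmiss, if_true, hb1]
          rw [if_pos ((PySem.Set.contains_iff _ _).mpr hseen)]
        obtain ⟨dq', nxt', d, em, hA, hB, hnd', hrel', hlen, hdem, hfail⟩ :=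
          ih pendt newly (ans ++ [a.1]) ndq nxt true htail hacc hnd
        refine ⟨dq', nxt', d, a.1 :: em, ?_, ?_, hnd', hrel', ?_, ?_, ?_⟩
        · rw [List.foldl_cons, hAstep, hA]; simp
        · rw [List.foldl_cons, hBstep, hB]; simp
        · simp only [List.length_cons] at *; omega
        · intro _; simp
        · intro hd0 hndq it hit
          exact hfail hd0 hndq it hit
      · -- new name: both extend the timeline by a.1
        have hAstep : pvStepA (ndq, seen0 ++ newly, ans) a =
            (ndq, seen0 ++ (newly ++ [a.1]), ans ++ [a.1]) := by
          simp only [pvStepA, hcond, if_true]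
          rw [PySem.Set.add_of_not_mem hseen, List.append_assoc]
        have hBstep : pvStepB (seen0 ++ newly, newly, ans, pr, nxt) b =
            (seen0 ++ (newly ++ [a.1]), newly ++ [a.1], ans ++ [a.1], true, nxt) := by
          simp only [pvStepB, hmiss, if_true, hb1]
          rw [if_neg (by simp [hseen]),
            PySem.Set.add_of_not_mem hseen, List.append_assoc]
        have hnd2 : (seen0 ++ (newly ++ [a.1])).Nodup := by
          rw [← List.append_assoc]
          simp only [List.nodup_append] at hnd ⊢
          refine ⟨hnd, List.nodup_singleton _, ?_⟩
          intro x hx y hy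
          simp only [List.mem_singleton] at hy
          subst hy
          exact fun hxy => hseen (hxy ▸ hx)
        obtain ⟨dq', nxt', d, em, hA, hB, hnd', hrel', hlen, hdem, hfail⟩ :=
          ih pendt (newly ++ [a.1]) (ans ++ [a.1]) ndq nxt true
            (htail.imp (fun x y h => itemRel_mono seen0 newly [a.1] x y h))
            (hacc.imp (fun x y h => itemRel_mono seen0 newly [a.1] x y h)) hnd2
        refine ⟨dq', nxt', a.1 :: d, a.1 :: em, ?_, ?_, ?_, ?_, ?_, ?_, ?_⟩
        · rw [List.foldl_cons, hAstep, hA]; simp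
        · rw [List.foldl_cons, hBstep, hB]; simp
        · simpa using hnd'
        · simpa using hrel'
        · simp only [List.length_cons] at *; omega
        · intro _; simp
        · intro hd0; exact absurd hd0 (by simp)
    · -- requeued
      have hcondf : a.2.all (fun i => PySem.Set.contains (seen0 ++ newly) i) = false :=
        Bool.eq_false_iff.mpr hcond
      have hmiss : PySem.Set.diff b.2.1
          (PySem.Set.ofList (PySem.List.slice newly (some b.2.2) none)) ≠ [] := by
        intro hc
        exact hcond ((missEmpty_iff seen0 newly a b hab).mp hc)
      have hAstep : pvStepA (ndq, seen0 ++ newly, ans) a = (ndq ++ [a], seen0 ++ newly, ans) := by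
        simp only [pvStepA, hcondf]
        simp
      have hBstep : pvStepB (seen0 ++ newly, newly, ans, pr, nxt) b =
          (seen0 ++ newly, newly, ans, pr,
            nxt ++ [(b.1, PySem.Set.diff b.2.1
              (PySem.Set.ofList (PySem.List.slice newly (some b.2.2) none)),
              (newly.length : Int))]) := by
        simp only [pvStepB]
        rw [if_neg hmiss]
      have hnewrel : ItemRel seen0 newly a
          (b.1, PySem.Set.diff b.2.1
            (PySem.Set.ofList (PySem.List.slice newly (some b.2.2) none)),
            (newly.length : Int)) := by
        refine ⟨hab.1, newly.length, rfl, le_refl _, ?_⟩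
        intro x
        rw [List.take_length]
        exact missMem seen0 newly a b hab x
      obtain ⟨dq', nxt', d, em, hA, hB, hnd', hrel', hlen, hdem, hfail⟩ :=
        ih pendt newly ans (ndq ++ [a]) (nxt ++ [_]) pr htail
          (forall₂_append hacc (List.forall₂_cons.mpr ⟨hnewrel, List.Forall₂.nil⟩)) hnd
      refine ⟨dq', nxt', d, em, ?_, ?_, hnd', hrel', ?_, hdem, ?_⟩
      · rw [List.foldl_cons, hAstep, hA]
      · rw [List.foldl_cons, hBstep, hB]
      · simp only [List.length_append, List.length_cons, List.length_nil] at hlen ⊢; omega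
      · intro hd0 hndq it hit
        refine hfail hd0 ?_ it hit
        intro it2 hit2
        rcases List.mem_append.mp hit2 with h1 | h2
        · exact hndq it2 h1
        · rw [List.mem_singleton] at h2
          subst h2
          exact hcondf

-- a round in which every item fails its check requeues everything and emits nothing
lemma pvAPass_allFail :
    ∀ (dq ndq : List (String × List String)) (seen : PySem.Set String) (ans : List String),
      (∀ it ∈ dq, it.2.all (fun i => PySem.Set.contains seen i) = false) →
      dq.foldl pvStepA (ndq, seen, ans) = (ndq ++ dq, seen, ans) := by
  intro dq
  induction dq with
  | nil => intro ndq seen ans _; simp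
  | cons a t ih =>
    intro ndq seen ans hf
    rw [List.foldl_cons]
    have : pvStepA (ndq, seen, ans) a = (ndq ++ [a], seen, ans) := by
      simp only [pvStepA, hf a (List.mem_cons_self)]
      simp
    rw [this, ih (ndq ++ [a]) seen ans (fun it hit => hf it (List.mem_cons_of_mem a hit))]
    simp

-- the empty-queue tail: A spins one no-op round and stops; B stops at once
lemma pvRunNil_gen (seen0 newly : List String) (ans : List String) (prev : Int)
    (fa fb : Nat) (hfa : 2 ≤ fa) (hfb : 1 ≤ fb)
    (hprev : prev < PySem.Set.len (seen0 ++ newly)) :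
    pvALoop fa [] (seen0 ++ newly) ans prev = pvBLoop fb [] (seen0 ++ newly) newly ans := by
  obtain ⟨fa1, rfl⟩ : ∃ k, fa = k + 1 := ⟨fa - 1, by omega⟩
  obtain ⟨fa2, rfl⟩ : ∃ k, fa1 = k + 1 := ⟨fa1 - 1, by omega⟩
  obtain ⟨fb1, rfl⟩ : ∃ k, fb = k + 1 := ⟨fb - 1, by omega⟩
  simp only [pvALoop, pvBLoop, if_pos hprev]
  have : pvAPass [] (seen0 ++ newly) ans = ([], seen0 ++ newly, ans) := rfl
  rw [this]
  simp

-- the coupled outer-loop lemma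
lemma pvRun (seen0 : List String) :
    ∀ (n fa fb : Nat) (dq : List (String × List String))
      (pend : List (String × PySem.Set String × Int)) (newly ans : List String) (prev : Int),
      dq.length ≤ n →
      List.Forall₂ (ItemRel seen0 newly) dq pend →
      (seen0 ++ newly).Nodup →
      prev < PySem.Set.len (seen0 ++ newly) →
      dq.length + 2 ≤ fa → dq.length + 2 ≤ fb →
      pvALoop fa dq (seen0 ++ newly) ans prev = pvBLoop fb pend (seen0 ++ newly) newly ans := by
  intro n
  induction n with
  | zero =>
    intro fa fb dq pend newly ans prev hn hrel hnd hprev hfa hfb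
    have hdq : dq = [] := List.length_eq_zero_iff.mp (Nat.le_zero.mp hn)
    subst hdq
    rcases hrel with _ | _
    exact pvRunNil_gen seen0 newly ans prev fa fb (by omega) (by omega) hprev
  | succ n ih =>
    intro fa fb dq pend newly ans prev hn hrel hnd hprev hfa hfb
    match dq, pend, hrel with
    | [], [], _ =>
      exact pvRunNil_gen seen0 newly ans prev fa fb (by omega) (by omega) hprev
    | a :: dqt, b :: pendt, hrel =>
      obtain ⟨fa1, rfl⟩ : ∃ k, fa = k + 1 := ⟨fa - 1, by omega⟩
      obtain ⟨fb1, rfl⟩ : ∃ k, fb = k + 1 := ⟨fb - 1, by omega⟩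
      obtain ⟨dq', nxt', d, em, hA, hB, hnd', hrel', hlen, hdem, hfail⟩ :=
        pvPassRel seen0 (a :: dqt) (b :: pendt) newly ans [] [] false hrel
          List.Forall₂.nil hnd
      simp only [pvALoop, pvBLoop, if_pos hprev]
      rw [pvAPass_eq, pvBPass_eq, hA, hB]
      by_cases hem : em = []
      · -- nothing emitted: B breaks; A sees no growth and stops next round
        subst hem
        have hd0 : d = [] := by
          by_contra hdne
          exact (hdem hdne) rfl
        subst hd0
        simp only [List.isEmpty_nil, Bool.not_true, Bool.or_false]
        obtain ⟨fa2, rfl⟩ : ∃ k, fa1 = k + 1 := ⟨fa1 - 1, by omega⟩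
        simp [pvALoop]
      · -- something emitted: B continues
        have hprB : (false || !em.isEmpty) = true := by
          simp [hem]
        rw [hprB]
        simp only [if_true]
        by_cases hd0 : d = []
        · -- no growth: A stops now; B does one fruitless round and breaks
          subst hd0
          simp only [List.append_nil] at hA hB hnd' hrel' ⊢
          obtain ⟨fa2, rfl⟩ : ∃ k, fa1 = k + 1 := ⟨fa1 - 1, by omega⟩
          have hAstop : pvALoop (fa2 + 1) dq' (seen0 ++ newly)
              (ans ++ em) (PySem.Set.len (seen0 ++ newly)) = ans ++ em := by
            simp [pvALoop]
          rw [hAstop]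
          -- B's extra round
          match nxt', hrel' with
          | [], _ =>
            obtain ⟨fb2, rfl⟩ : ∃ k, fb1 = k + 1 := ⟨fb1 - 1, by omega⟩
            simp [pvBLoop]
          | c :: nxtt, hrel' =>
            obtain ⟨fb2, rfl⟩ : ∃ k, fb1 = k + 1 := ⟨fb1 - 1, by omega⟩
            have hrel2 : List.Forall₂ (ItemRel seen0 newly) dq' (c :: nxtt) := hrel'
            have hallfail : ∀ it ∈ dq',
                it.2.all (fun i => PySem.Set.contains (seen0 ++ newly) i) = false :=
              hfail rfl (by intro it hit; simp at hit)
            obtain ⟨dq2, nxt2, d2, em2, hA2, hB2, _, _, _, _, _⟩ :=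
              pvPassRel seen0 dq' (c :: nxtt) newly (ans ++ em) [] [] false hrel2
                List.Forall₂.nil hnd'
            rw [pvAPass_allFail dq' [] (seen0 ++ newly) (ans ++ em) hallfail] at hA2
            have hem2 : em2 = [] := by
              have := congrArg (fun st => st.2.2) hA2
              simp only at this
              exact (List.self_eq_append_right.mp this)
            subst hem2
            simp only [pvBLoop]
            rw [pvBPass_eq, hB2]
            simp
        · -- growth: both continue; the queue shrank, apply the induction hypothesis
          have hgrow : PySem.Set.len (seen0 ++ newly) < PySem.Set.len (seen0 ++ (newly ++ d)) := by
            simp only [PySem.Set.len, List.length_append]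
            have : 0 < d.length := List.length_pos_iff.mpr hd0
            push_cast
            omega
          have hemlen : 1 ≤ em.length := by
            rcases em with _ | ⟨x, t⟩
            · exact absurd rfl hem
            · simp
          simp only [List.length_cons, List.length_nil] at hlen hn hfa hfb
          exact ih fa1 fb1 dq' nxt' (newly ++ d) (ans ++ em)
            (PySem.Set.len (seen0 ++ newly)) (by omega) hrel' hnd' hgrow (by omega) (by omega)

-- initial coupling between A's queue and B's pending list
lemma pvInitRel (seen0 : PySem.Set String) (dq : List (String × List String)) :
    List.Forall₂ (ItemRel seen0 []) dq
      (dq.map (fun p =>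
        (p.1, PySem.Set.ofList (p.2.filter (fun x => !(PySem.Set.contains seen0 x))), (0 : Int)))) := by
  induction dq with
  | nil => exact List.Forall₂.nil
  | cons a t ih =>
    refine List.Forall₂.cons ?_ ih
    refine ⟨rfl, 0, by simp, by simp, ?_⟩
    intro x
    have hcon : (!(PySem.Set.contains seen0 x)) = true ↔ x ∉ seen0 := by
      rw [Bool.not_eq_true']
      constructor
      · intro h hm
        rw [(PySem.Set.contains_iff seen0 x).mpr hm] at h
        cases h
      · intro h
        exact Bool.eq_false_iff.mpr (fun hc => h ((PySem.Set.contains_iff seen0 x).mp hc))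
    rw [PySem.Set.mem_ofList, List.mem_filter, hcon]
    simp

-- ===== VERDICT (by name: the statement is the Claim_ definition above) =====
theorem find_all_recipes0_spec : Claim_equal_find_all_recipes0 := by
  intro recipes ingredients supplies _
  unfold Spec_find_all_recipes0 find_all_recipes0 find_all_recipes0_alt
  have h := pvRun (PySem.Set.ofList supplies) (recipes.zip ingredients).length
    ((recipes.zip ingredients).length + 2) ((recipes.zip ingredients).length + 2)
    (recipes.zip ingredients)
    ((recipes.zip ingredients).map (fun p =>
      (p.1, PySem.Set.ofList (p.2.filter (fun x => !(PySem.Set.contains (PySem.Set.ofList supplies) x))), (0 : Int))))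
    [] [] (PySem.Set.len (PySem.Set.ofList supplies) - 1)
    (le_refl _)
    (pvInitRel (PySem.Set.ofList supplies) (recipes.zip ingredients))
    (by simp)
    (by simp [PySem.Set.len])
    (le_refl _) (le_refl _)
  simpa using h
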